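-- pv_equiv track=rewrite | github.com/bradyduncan/financial-news-event-detection | preprocessing/preprocess_text.py | _apply_negation
-- ===== SOURCE A (Python) =====
-- NEGATORS = {"no", "not", "nor", "never", "n't"}
--
-- def _apply_negation(tokens):
--     out = []
--     skip_next = False
--     for idx, tok in enumerate(tokens):
--         if skip_next:
--             skip_next = False
--             continue
--         if tok in NEGATORS and idx + 1 < len(tokens):
--             out.append(f"not_{tokens[idx + 1]}")
--             skip_next = True
--         else:
--             out.append(tok)
--     return out
-- ===== SOURCE B (Python) =====
-- NEGATORS = {"no", "not", "nor", "never", "n't"}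
--
-- def _apply_negation(tokens):
--     # Dynamic programming back-to-front: suffix[i] is the answer for tokens[i:],
--     # stored as an immutable linked list (cons cells), so suffix[i] is built in
--     # O(1) from suffix[i+1] / suffix[i+2]; finally suffix[0] is flattened.
--     n = len(tokens)
--     suffix = [None] * (n + 1)  # None = empty linked list
--     for i in range(n - 1, -1, -1):
--         if tokens[i] in NEGATORS and i + 1 < n:
--             suffix[i] = ("not_" + tokens[i + 1], suffix[i + 2])
--         else:
--             suffix[i] = (tokens[i], suffix[i + 1])
--     out = []
--     cell = suffix[0]
--     while cell is not None:
--         out.append(cell[0])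
--         cell = cell[1]
--     return out
-- ===== Notes on version B (the rewrite author's own statement) =====
-- stated objective: alternative
-- what changed: Replaces A's forward loop with a skip_next flag and a growing output list by a right-to-left dynamic program: suffix[i], the answer for tokens[i:], is built as an O(1) cons cell from suffix[i+1] or suffix[i+2], and suffix[0] is flattened at the end.
import Mathlib
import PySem

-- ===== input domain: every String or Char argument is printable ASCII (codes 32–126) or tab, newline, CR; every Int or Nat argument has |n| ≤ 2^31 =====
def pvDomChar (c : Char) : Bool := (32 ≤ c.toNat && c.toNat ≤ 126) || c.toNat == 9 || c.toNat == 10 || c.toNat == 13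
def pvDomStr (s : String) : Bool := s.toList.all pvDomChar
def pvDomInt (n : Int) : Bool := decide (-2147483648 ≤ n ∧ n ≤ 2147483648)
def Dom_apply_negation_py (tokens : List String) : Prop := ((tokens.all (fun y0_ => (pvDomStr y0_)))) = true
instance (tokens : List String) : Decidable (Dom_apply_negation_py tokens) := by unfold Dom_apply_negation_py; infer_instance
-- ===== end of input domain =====

-- B replaces A's forward loop with a skip_next flag by a right-to-left dynamic program over
-- suffixes built from cons cells (same O(n) cost, a genuinely different traversal).

-- ===== PORT A =====
-- the NEGATORS set (distinct elements)
def pvNEGATORS : List String := ["no", "not", "nor", "never", "n't"]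

-- one iteration of A's for-loop body; state = (out, skip_next)
def pvNegStepA (tokens : List String) (st : List String × Bool) (p : Int × String) :
    List String × Bool :=
  if st.2 then (st.1, false)
  else if p.2 ∈ pvNEGATORS ∧ p.1 + 1 < (tokens.length : Int) then
    (st.1 ++ ["not_" ++ (PySem.List.pyGet? tokens (p.1 + 1)).getD ""], true)
  else (st.1 ++ [p.2], false)

def apply_negation_py (tokens : List String) : List String :=
  ((PySem.List.enumerate tokens 0).foldl (pvNegStepA tokens) ([], false)).1

-- ===== PORT B =====
-- Source B's linked cons cells: Python None ↦ nil, ("s", next) ↦ cons "s" next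
inductive PvCell : Type
  | nil : PvCell
  | cons : String → PvCell → PvCell
deriving DecidableEq, Repr

-- Source B's final while loop flattening a cell chain into a list
def pvCellToList : PvCell → List String
  | .nil => []
  | .cons s c => s :: pvCellToList c

-- one iteration of Source B's backward for-loop; the suffix array is a List PvCell of
-- length n+1 indexed absolutely (all reads/writes are in range, default is harmless)
def pvStepB (tokens : List String) (suffix : List PvCell) (i : Int) : List PvCell :=
  if (PySem.List.pyGet? tokens i).getD "" ∈ pvNEGATORS ∧ i + 1 < (tokens.length : Int) then
    suffix.set i.toNat
      (PvCell.cons ("not_" ++ (PySem.List.pyGet? tokens (i + 1)).getD "")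
        (suffix.getD (i.toNat + 2) .nil))
  else
    suffix.set i.toNat
      (PvCell.cons ((PySem.List.pyGet? tokens i).getD "") (suffix.getD (i.toNat + 1) .nil))

def apply_negation_py_alt (tokens : List String) : List String :=
  pvCellToList
    (((PySem.List.pyRange ((tokens.length : Int) - 1) (-1) (-1)).foldl (pvStepB tokens)
        (List.replicate (tokens.length + 1) PvCell.nil)).getD 0 .nil)

-- ===== PRECONDITION & SPEC =====
def Spec_apply_negation_py (tokens : List String) (out : List String) : Prop := out = apply_negation_py_alt tokens
instance (tokens : List String) (out : List String) : Decidable (Spec_apply_negation_py tokens out) := by unfold Spec_apply_negation_py; infer_instance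

-- ===== CLAIM (what is proved, stated in full; the proofs are below) =====
def Claim_equal_apply_negation_py : Prop := ∀ (tokens : List String), Dom_apply_negation_py tokens → Spec_apply_negation_py tokens (apply_negation_py tokens)

-- ===== LEMMAS AND PROOFS =====

-- proof-side reference function: the plain structural recursion both programs compute
def pvNegRec : List String → List String
  | [] => []
  | [t] => [t]
  | t :: u :: rest =>
    if t ∈ pvNEGATORS then ("not_" ++ u) :: pvNegRec rest
    else t :: pvNegRec (u :: rest)

-- unfolding pvNegRec's non-merging step for an arbitrary tail
theorem pvNegRecCons (t : String) (rest : List String)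
    (h : ¬ (t ∈ pvNEGATORS ∧ rest ≠ [])) :
    pvNegRec (t :: rest) = t :: pvNegRec rest := by
  cases rest with
  | nil => rfl
  | cons u r =>
    have : t ∉ pvNEGATORS := fun hm => h ⟨hm, by simp⟩
    simp [pvNegRec, this]

-- A's fold over the suffix of enumerate starting at index i, entered with skip_next = false,
-- appends exactly pvNegRec (tokens.drop i) and leaves skip_next = false.
theorem pvNegMain (tokens : List String) :
    ∀ (n i : Nat) (acc : List String), tokens.length - i = n → i ≤ tokens.length →
      ((PySem.List.enumerate tokens 0).drop i).foldl (pvNegStepA tokens) (acc, false)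
        = (acc ++ pvNegRec (tokens.drop i), false) := by
  intro n
  induction n using Nat.strong_induction_on with
  | _ n IH =>
    intro i acc hn hi
    have hlen : (PySem.List.enumerate tokens 0).length = tokens.length := by
      simp [PySem.List.length_enumerate]
    by_cases h : i < tokens.length
    · have hdrop : (PySem.List.enumerate tokens 0).drop i
          = (PySem.List.enumerate tokens 0)[i]'(by omega) :: (PySem.List.enumerate tokens 0).drop (i + 1) := by
        exact List.drop_eq_getElem_cons (by omega)
      have hget : (PySem.List.enumerate tokens 0)[i]'(by omega)
          = ((i : Int), tokens[i]) := by
        simp [PySem.List.getElem_enumerate]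
      have hdropTok : tokens.drop i = tokens[i] :: tokens.drop (i + 1) :=
        List.drop_eq_getElem_cons h
      rw [hdrop]
      simp only [List.foldl_cons, hget]
      by_cases hc : tokens[i] ∈ pvNEGATORS ∧ i + 1 < tokens.length
      · -- merge branch: consume tokens[i+1] on the next iteration (skip_next = true)
        have hc' : tokens[i] ∈ pvNEGATORS ∧ (i : Int) + 1 < (tokens.length : Int) := by
          exact ⟨hc.1, by exact_mod_cast hc.2⟩
        have hpy : PySem.List.pyGet? tokens ((i : Int) + 1) = some (tokens[i + 1]'hc.2) := by
          have : ((i : Int) + 1) = ((i + 1 : Nat) : Int) := by push_cast; ring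
          rw [this, PySem.List.pyGet?_natCast]
          simp [hc.2]
        have hdrop2 : (PySem.List.enumerate tokens 0).drop (i + 1)
            = (PySem.List.enumerate tokens 0)[i + 1]'(by omega) :: (PySem.List.enumerate tokens 0).drop (i + 2) := by
          exact List.drop_eq_getElem_cons (by omega)
        have hdropTok2 : tokens.drop (i + 1) = (tokens[i + 1]'hc.2) :: tokens.drop (i + 2) :=
          List.drop_eq_getElem_cons hc.2
        rw [show pvNegStepA tokens (acc, false) ((i : Int), tokens[i])
              = (acc ++ ["not_" ++ tokens[i + 1]'hc.2], true) by
            simp [pvNegStepA, hc', hpy]]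
        rw [hdrop2]
        simp only [List.foldl_cons]
        rw [show pvNegStepA tokens (acc ++ ["not_" ++ tokens[i + 1]'hc.2], true)
              ((PySem.List.enumerate tokens 0)[i + 1]'(by omega))
              = (acc ++ ["not_" ++ tokens[i + 1]'hc.2], false) by simp [pvNegStepA]]
        rw [IH (tokens.length - (i + 2)) (by omega) (i + 2) _ rfl (by omega)]
        rw [hdropTok, hdropTok2]
        simp [pvNegRec, hc.1]
      · -- plain branch: emit the token, advance by 1
        have hc' : ¬ (tokens[i] ∈ pvNEGATORS ∧ (i : Int) + 1 < (tokens.length : Int)) := by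
          intro ⟨h1, h2⟩
          exact hc ⟨h1, by exact_mod_cast h2⟩
        rw [show pvNegStepA tokens (acc, false) ((i : Int), tokens[i])
              = (acc ++ [tokens[i]], false) by simp [pvNegStepA, hc']]
        rw [IH (tokens.length - (i + 1)) (by omega) (i + 1) _ rfl (by omega)]
        rw [hdropTok]
        rw [pvNegRecCons tokens[i] (tokens.drop (i + 1)) (by
          intro ⟨h1, h2⟩
          refine hc ⟨h1, ?_⟩
          by_contra hge
          exact h2 (List.drop_eq_nil_of_le (by omega)))]
        simp
    · -- past the end: both sides are done
      have hi' : i = tokens.length := by omega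
      subst hi'
      rw [← hlen, List.drop_length, hlen, List.drop_length]
      simp [pvNegRec]

-- reading the suffix array after a write: List.getD through List.set
theorem pvGetDSet (s : List PvCell) (k : Nat) (c : PvCell) (j : Nat) (hk : k < s.length) :
    (s.set k c).getD j .nil = if k = j then c else s.getD j .nil := by
  simp only [List.getD, List.getElem?_set]
  by_cases h : k = j
  · subst h; simp [hk]
  · simp [h]

-- B's backward fold preserves the invariant: every already-written suffix[j] (j ≥ i)
-- flattens to pvNegRec (tokens.drop j); after the whole countdown it holds for all j.
theorem pvNegMainB (tokens : List String) :
    ∀ (i : Nat) (s : List PvCell), s.length = tokens.length + 1 → i ≤ tokens.length →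
      (∀ j : Nat, i ≤ j → j ≤ tokens.length →
        pvCellToList (s.getD j .nil) = pvNegRec (tokens.drop j)) →
      ∀ j : Nat, j ≤ tokens.length →
        pvCellToList
          (((PySem.List.pyRange ((i : Int) - 1) (-1) (-1)).foldl (pvStepB tokens) s).getD j .nil)
          = pvNegRec (tokens.drop j) := by
  intro i
  induction i with
  | zero =>
    intro s _ _ hinv j hj
    rw [PySem.List.pyRange_neg_one_eq_nil (by omega)]
    exact hinv j (Nat.zero_le j) hj
  | succ i IH =>
    intro s hslen hi hinv j hj
    have hcons : PySem.List.pyRange (((i : Nat) + 1 : Int) - 1) (-1) (-1)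
        = ((i : Int)) :: PySem.List.pyRange ((i : Int) - 1) (-1) (-1) := by
      have : (((i : Nat) + 1 : Int) - 1) = (i : Int) := by push_cast; ring
      rw [this]
      exact PySem.List.pyRange_neg_one_cons (by omega)
    have hilen : i < tokens.length := by omega
    have hgeti : PySem.List.pyGet? tokens ((i : Int)) = some (tokens[i]'hilen) := by
      rw [PySem.List.pyGet?_natCast]; simp [hilen]
    have hdropTok : tokens.drop i = tokens[i] :: tokens.drop (i + 1) :=
      List.drop_eq_getElem_cons hilen
    rw [show ((i + 1 : Nat) : Int) - 1 = ((i : Nat) + 1 : Int) - 1 by push_cast; ring, hcons,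
      List.foldl_cons]
    -- show the new state satisfies the invariant one index lower, then apply IH
    apply IH (pvStepB tokens s (i : Int))
    · unfold pvStepB
      split_ifs <;> simp [hslen]
    · omega
    · intro j' hij' hj'
      by_cases hji : j' = i
      · -- the freshly written cell
        subst hji
        by_cases hc : tokens[j'] ∈ pvNEGATORS ∧ j' + 1 < tokens.length
        · have hc' : (PySem.List.pyGet? tokens ((j' : Int))).getD "" ∈ pvNEGATORS
              ∧ (j' : Int) + 1 < (tokens.length : Int) := by
            rw [hgeti]; exact ⟨hc.1, by exact_mod_cast hc.2⟩
          have hpy : PySem.List.pyGet? tokens ((j' : Int) + 1) = some (tokens[j' + 1]'hc.2) := by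
            have : ((j' : Int) + 1) = ((j' + 1 : Nat) : Int) := by push_cast; ring
            rw [this, PySem.List.pyGet?_natCast]; simp [hc.2]
          have hdropTok2 : tokens.drop (j' + 1) = (tokens[j' + 1]'hc.2) :: tokens.drop (j' + 2) :=
            List.drop_eq_getElem_cons hc.2
          unfold pvStepB
          rw [if_pos hc']
          simp only [Int.toNat_natCast]
          rw [pvGetDSet s j' _ j' (by omega), if_pos rfl, hpy]
          simp only [pvCellToList, Option.getD_some]
          rw [hinv (j' + 2) (by omega) (by omega)]
          rw [hdropTok, hdropTok2]
          simp [pvNegRec, hc.1]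
        · have hc' : ¬ ((PySem.List.pyGet? tokens ((j' : Int))).getD "" ∈ pvNEGATORS
              ∧ (j' : Int) + 1 < (tokens.length : Int)) := by
            rw [hgeti]
            intro ⟨h1, h2⟩
            exact hc ⟨h1, by exact_mod_cast h2⟩
          unfold pvStepB
          rw [if_neg hc']
          simp only [Int.toNat_natCast]
          rw [pvGetDSet s j' _ j' (by omega), if_pos rfl, hgeti]
          simp only [pvCellToList, Option.getD_some]
          rw [hinv (j' + 1) (by omega) (by omega)]
          rw [hdropTok]
          rw [pvNegRecCons tokens[j'] (tokens.drop (j' + 1)) (by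
            intro ⟨h1, h2⟩
            refine hc ⟨h1, ?_⟩
            by_contra hge
            exact h2 (List.drop_eq_nil_of_le (by omega)))]
      · -- an untouched cell above the write
        have hji' : i ≠ j' := fun h => hji h.symm
        unfold pvStepB
        have hgd : ∀ (c : PvCell), (s.set ((i : Int)).toNat c).getD j' .nil = s.getD j' .nil := by
          intro c
          simp only [Int.toNat_natCast]
          rw [pvGetDSet s i c j' (by omega), if_neg hji']
        split_ifs <;> rw [hgd] <;> exact hinv j' (by omega) hj'
    · exact hj
  -- (induction ends)

-- B computes pvNegRec
theorem pvNegAltEq (tokens : List String) : apply_negation_py_alt tokens = pvNegRec tokens := by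
  unfold apply_negation_py_alt
  have h := pvNegMainB tokens tokens.length (List.replicate (tokens.length + 1) PvCell.nil)
    (by simp) (le_refl _)
    (by
      intro j hij hj
      have hj' : j = tokens.length := by omega
      subst hj'
      simp [List.getD, pvCellToList, pvNegRec])
    0 (Nat.zero_le _)
  simpa using h

-- ===== VERDICT (by name: the statement is the Claim_ definition above) =====
theorem apply_negation_py_spec : Claim_equal_apply_negation_py := by
  intro tokens _
  unfold Spec_apply_negation_py apply_negation_py
  rw [pvNegAltEq]
  have := pvNegMain tokens tokens.length 0 [] (by omega) (by omega)
  simp only [List.drop_zero] at this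
  rw [this]
  simp
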